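-- pv_equiv track=rewrite | github.com/Hugodjj/TEP | Semana 5/Problema C.py | divides_factorial
-- ===== SOURCE A (Python) =====
-- import math
--
-- def prime_factors(n):
--     factors = {}
--     # Conta o número de vezes que 2 divide n
--     while n % 2 == 0:
--         if 2 not in factors:
--             factors[2] = 0
--         factors[2] += 1
--         n //= 2
--     # Conta o número de vezes que números ímpares dividem n
--     for i in range(3, int(math.sqrt(n)) + 1, 2):
--         while n % i == 0:
--             if i not in factors:
--                 factors[i] = 0
--             factors[i] += 1
--             n //= i
--     # Se sobrar algum número primo maior que sqrt(n)
--     if n > 2: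
--         factors[n] = 1
--     return factors
--
-- def divides_factorial(n, m):
--     if m == 0:
--         return False  # Nenhum número divide 0
--
--     # Fatora o número m
--     m_factors = prime_factors(m)
--
--     # Conta os fatores primos de m no fatorial de n
--     for prime, exponent in m_factors.items():
--         count = 0
--         power = prime
--         # Conta quantas vezes prime aparece nos fatores de n!
--         while power <= n:
--             count += n // power
--             power *= prime
--         if count < exponent:
--             return False
--     return True
-- ===== SOURCE B (Python) =====
-- from math import gcd, isqrt
--
-- def divides_factorial(n, m):
--     if m == 0:
--         return False
--     r = m
--     bound = 2 * isqrt(m) + 64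
--     if n <= bound:
--         for k in range(2, n + 1):
--             r //= gcd(r, k)
--         return r == 1
--     for k in range(2, bound + 1):
--         r //= gcd(r, k)
--     return r <= n
-- ===== Notes on version B (the rewrite author's own statement) =====
-- stated objective: simpler
-- what changed: A factorizes m by trial division and checks each prime's exponent in n! with Legendre's formula; B never factorizes: it strips m by repeatedly dividing out gcd(m, k) for k = 2..min(n, 2*isqrt(m)+64) and reads the answer off the residue.
import Mathlib
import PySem

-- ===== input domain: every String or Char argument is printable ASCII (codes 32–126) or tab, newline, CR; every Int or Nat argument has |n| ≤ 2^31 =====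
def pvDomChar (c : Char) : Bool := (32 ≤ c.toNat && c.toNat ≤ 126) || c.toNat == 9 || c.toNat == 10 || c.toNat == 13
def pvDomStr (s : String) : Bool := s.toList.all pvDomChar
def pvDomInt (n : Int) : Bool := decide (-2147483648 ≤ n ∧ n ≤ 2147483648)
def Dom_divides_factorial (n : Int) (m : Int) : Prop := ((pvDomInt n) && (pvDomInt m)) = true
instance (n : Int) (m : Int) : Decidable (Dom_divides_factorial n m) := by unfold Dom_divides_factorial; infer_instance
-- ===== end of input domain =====

-- B replaces A's trial-division factorization + Legendre counting by a single gcd-stripping pass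
-- over the factors 2..min(n, 2*isqrt(m)+64) of n! (objective: simpler).


-- ===== PORT A =====
-- int(math.sqrt(v)) ported as Nat.sqrt: exact for 0 ≤ v ≤ 2^31 (the only calls reached inside
-- Pre_), since IEEE-754 double sqrt is correctly rounded and these v are far below 2^53.
def pySqrtInt (v : Int) : Int := (v.toNat.sqrt : Int)

-- 'while n % i == 0: if i not in factors: factors[i] = 0; factors[i] += 1; n //= i'.
-- The fuel only makes the recursion structural: n.natAbs + 1 bounds the iteration count on every
-- input reached inside Pre_ (each pass replaces n ≥ 1 by n // i with i ≥ 2).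
def pfStrip (i : Int) : Nat → PySem.Dict Int Int × Int → PySem.Dict Int Int × Int
  | 0, st => st
  | fuel+1, (factors, n) =>
    if PySem.Int.mod n i = 0 then
      let factors := if (factors.get? i).isNone then factors.insert i 0 else factors
      let factors := factors.insert i (factors.getD i 0 + 1)
      pfStrip i fuel (factors, PySem.Int.floordiv n i)
    else (factors, n)

def prime_factors (n : Int) : PySem.Dict Int Int :=
  let st := pfStrip 2 (n.natAbs + 1) (PySem.Dict.empty, n)
  let st := (PySem.List.pyRange 3 (pySqrtInt st.2 + 1) 2).foldl
      (fun st i => pfStrip i (st.2.natAbs + 1) st) st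
  if st.2 > 2 then st.1.insert st.2 1 else st.1

-- 'count = 0; power = prime; while power <= n: count += n // power; power *= prime'.
-- Fuel 64 is enough on every input reached inside Pre_/Dom: prime ≥ 2, so power exceeds
-- n ≤ 2^31 within 32 iterations and the loop always exits by its own test.
def dfCount (n prime : Int) : Nat → Int → Int → Int
  | 0, count, _ => count
  | fuel+1, count, power =>
    if power ≤ n then dfCount n prime fuel (count + PySem.Int.floordiv n power) (power * prime)
    else count

def divides_factorial (n : Int) (m : Int) : Bool :=
  if m = 0 then false
  else
    (prime_factors m).items.all fun pe => !decide (dfCount n pe.1 64 0 pe.1 < pe.2)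

-- ===== PORT B =====
-- r //= gcd(r, k)   (math.gcd = gcd of absolute values = Int.gcd)
def altStep (r k : Int) : Int := PySem.Int.floordiv r ((Int.gcd r k : Nat) : Int)

-- math.isqrt(m) ported as Nat.sqrt (exact for m ≥ 0; m < 0 raises in Python, outside Pre_)
def divides_factorial_alt (n : Int) (m : Int) : Bool :=
  if m = 0 then false
  else
    let bound : Int := 2 * (m.toNat.sqrt : Int) + 64
    if n ≤ bound then
      decide ((PySem.List.pyRange 2 (n + 1) 1).foldl altStep m = 1)
    else
      decide ((PySem.List.pyRange 2 (bound + 1) 1).foldl altStep m ≤ n)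

-- ===== PRECONDITION & SPEC =====
-- Pre_ excludes exactly the inputs where A raises: for every m < 0 the residue after stripping
-- twos is negative and math.sqrt of it raises ValueError (B's math.isqrt raises there too).
def Pre_divides_factorial (n : Int) (m : Int) : Prop := 0 ≤ m
instance (n : Int) (m : Int) : Decidable (Pre_divides_factorial n m) := by
  unfold Pre_divides_factorial; infer_instance

def pvWitness_divides_factorial : Int × Int := (6, 9)

def Spec_divides_factorial (n : Int) (m : Int) (out : Bool) : Prop := out = divides_factorial_alt n m
instance (n : Int) (m : Int) (out : Bool) : Decidable (Spec_divides_factorial n m out) := by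
  unfold Spec_divides_factorial; infer_instance

-- ===== CLAIM (what is proved, stated in full; the proofs are below) =====
def Claim_equal_divides_factorial : Prop := ∀ (n : Int) (m : Int), Dom_divides_factorial n m → Pre_divides_factorial n m → Spec_divides_factorial n m (divides_factorial n m)

-- ===== LEMMAS AND PROOFS =====


theorem dict_insert_insert (d : PySem.Dict Int Int) (k : Int) (a b : Int) :
    (d.insert k a).insert k b = d.insert k b := by
  apply PySem.Dict.ext
  by_cases h : d.contains k = true
  · rw [PySem.Dict.items_insert_of_contains _ _ ((PySem.Dict.contains_insert_self d k a)),
        PySem.Dict.items_insert_of_contains _ _ h, PySem.Dict.items_insert_of_contains _ _ h,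
        List.map_map]
    apply List.map_congr_left
    intro p _
    by_cases hp : p.1 = k <;> simp [hp]
  · have h' : d.contains k = false := by simpa using h
    have hne : ∀ p ∈ d.items, p.1 ≠ k := by
      intro p hp heq
      have hk : k ∈ d.keys := by
        have : p.1 ∈ d.items.map Prod.fst := List.mem_map_of_mem hp
        rw [heq] at this
        simpa [PySem.Dict.keys] using this
      rw [← PySem.Dict.contains_iff_mem_keys] at hk
      simp [hk] at h'
    rw [PySem.Dict.items_insert_of_contains _ _ ((PySem.Dict.contains_insert_self d k a)),
        PySem.Dict.items_insert_of_not_contains _ _ h', PySem.Dict.items_insert_of_not_contains _ _ h',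
        List.map_append]
    congr 1
    · conv_rhs => rw [← List.map_id d.items]
      apply List.map_congr_left
      intro p hp
      simp [hne p hp]
    · simp

theorem fac_eq_of_pow_dvd {p e r : ℕ} (hp : p.Prime) (hr : r ≠ 0)
    (hd : p ^ e ∣ r) (hnd : ¬ p ∣ r / p ^ e) : r.factorization p = e := by
  have h1 : e ≤ r.factorization p := (Nat.Prime.pow_dvd_iff_le_factorization hp hr).mp hd
  have h2 : ¬ (e + 1 ≤ r.factorization p) := by
    intro hle
    apply hnd
    obtain ⟨c, hc⟩ := (Nat.Prime.pow_dvd_iff_le_factorization hp hr).mpr hle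
    refine ⟨c, ?_⟩
    rw [hc, pow_succ, mul_assoc, mul_comm p c,
      Nat.mul_div_cancel_left _ (pow_pos hp.pos e)]
  omega

theorem pfStrip_go (I : ℕ) (hI : 2 ≤ I) :
    ∀ (fuel : Nat) (d : PySem.Dict Int Int) (N : ℕ) (c : Int), 1 ≤ N → N ≤ fuel →
    d.get? (I : Int) = some c →
    ∃ e : ℕ, I ^ e ∣ N ∧ ¬ (I ∣ N / I ^ e) ∧
      pfStrip (I : Int) fuel (d, (N : Int)) =
        ((if e = 0 then d else d.insert (I : Int) (c + (e : Int))), ((N / I ^ e : ℕ) : Int)) := by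
  intro fuel
  induction fuel with
  | zero => intro d N c h1 h2 _; omega
  | succ f ih =>
    intro d N c h1 h2 hget
    by_cases hdvd : I ∣ N
    · have hmod : PySem.Int.mod (N : Int) (I : Int) = 0 := by
        rw [PySem.Int.mod_natCast, Nat.mod_eq_zero_of_dvd hdvd]; rfl
      have hq1 : 1 ≤ N / I := Nat.one_le_div_iff (by omega) |>.mpr (Nat.le_of_dvd (by omega) hdvd)
      have hqlt : N / I < N := Nat.div_lt_self (by omega) (by omega)
      have hflo : PySem.Int.floordiv (N : Int) (I : Int) = ((N / I : ℕ) : Int) :=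
        PySem.Int.floordiv_natCast N I
      have hgetD : d.getD (I : Int) 0 = c := PySem.Dict.getD_of_get?_eq_some _ _ hget
      have hget2 : (d.insert (I : Int) (c + 1)).get? (I : Int) = some (c + 1) :=
        PySem.Dict.get?_insert_self _ _ _
      obtain ⟨e', hd', hnd', heq'⟩ := ih (d.insert (I : Int) (c + 1)) (N / I) (c + 1) hq1 (by omega) hget2
      refine ⟨e' + 1, ?_, ?_, ?_⟩
      · have : I ^ (e' + 1) = I * I ^ e' := by ring
        rw [this]
        obtain ⟨q, hq⟩ := hd'
        exact ⟨q, by rw [← Nat.div_mul_cancel hdvd, hq]; ring⟩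
      · have hdd : N / I ^ (e' + 1) = N / I / I ^ e' := by
          rw [Nat.div_div_eq_div_mul, ← pow_succ']
        rw [hdd]; exact hnd'
      · simp only [pfStrip, hmod, if_pos, hget, Option.isNone_some, Bool.false_eq_true,
          if_false, hgetD, hflo, heq']
        have hdict : (if e' = 0 then d.insert (I:Int) (c+1)
            else (d.insert (I:Int) (c+1)).insert (I:Int) (c+1+(e':Int)))
            = d.insert (I:Int) (c + ((e'+1 : ℕ) : Int)) := by
          by_cases he : e' = 0
          · simp [he]
          · rw [if_neg he, dict_insert_insert]
            congr 1
            push_cast; ring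
        rw [hdict]
        congr 2
        rw [Nat.div_div_eq_div_mul, ← pow_succ']
    · refine ⟨0, by simp, by simpa using hdvd, ?_⟩
      have hmod : ¬ PySem.Int.mod (N : Int) (I : Int) = 0 := by
        rw [PySem.Int.mod_natCast]
        intro h
        exact hdvd (Nat.dvd_of_mod_eq_zero (by exact_mod_cast h))
      have hmod' : ¬ ((I:Int) ∣ (N:Int)) := by exact_mod_cast hdvd
      simp [pfStrip, hmod']

theorem pfStrip_spec (I : ℕ) (hI : 2 ≤ I) (fuel : Nat) (d : PySem.Dict Int Int) (N : ℕ)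
    (hN : 1 ≤ N) (hfuel : N ≤ fuel) (hfresh : d.contains (I : Int) = false) :
    ∃ e : ℕ, I ^ e ∣ N ∧ ¬ (I ∣ N / I ^ e) ∧
      pfStrip (I : Int) fuel (d, (N : Int)) =
        ((if e = 0 then d else d.insert (I : Int) (e : Int)), ((N / I ^ e : ℕ) : Int)) := by
  obtain ⟨f, rfl⟩ : ∃ f, fuel = f + 1 := ⟨fuel - 1, by omega⟩
  have hget : d.get? (I : Int) = none := by
    rw [PySem.Dict.get?_eq_none_iff_contains]
    exact hfresh
  by_cases hdvd : I ∣ N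
  · have hmod : PySem.Int.mod (N : Int) (I : Int) = 0 := by
      rw [PySem.Int.mod_natCast, Nat.mod_eq_zero_of_dvd hdvd]; rfl
    have hq1 : 1 ≤ N / I := Nat.one_le_div_iff (by omega) |>.mpr (Nat.le_of_dvd (by omega) hdvd)
    have hqlt : N / I < N := Nat.div_lt_self (by omega) (by omega)
    have hcol : (d.insert (I:Int) 0).insert (I:Int) ((d.insert (I:Int) 0).getD (I:Int) 0 + 1)
        = d.insert (I:Int) 1 := by
      rw [PySem.Dict.getD_insert_self, dict_insert_insert]
      norm_num
    have hget2 : (d.insert (I : Int) 1).get? (I : Int) = some 1 :=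
      PySem.Dict.get?_insert_self _ _ _
    obtain ⟨e', hd', hnd', heq'⟩ := pfStrip_go I hI f (d.insert (I : Int) 1) (N / I) 1 hq1 (by omega) hget2
    refine ⟨e' + 1, ?_, ?_, ?_⟩
    · have : I ^ (e' + 1) = I * I ^ e' := by ring
      rw [this]
      obtain ⟨q, hq⟩ := hd'
      exact ⟨q, by rw [← Nat.div_mul_cancel hdvd, hq]; ring⟩
    · rw [Nat.div_div_eq_div_mul, ← pow_succ'] at hnd'
      exact hnd'
    · simp only [pfStrip, hmod, if_pos, hget, Option.isNone_none,
        PySem.Int.floordiv_natCast, hcol, heq']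
      have hdict : (if e' = 0 then d.insert (I:Int) 1
          else (d.insert (I:Int) 1).insert (I:Int) (1+(e':Int)))
          = d.insert (I:Int) ((e'+1 : ℕ) : Int) := by
        by_cases he : e' = 0
        · simp [he]
        · rw [if_neg he, dict_insert_insert]
          congr 1
          push_cast; ring
      rw [hdict]
      have : N / I / I ^ e' = N / I ^ (e' + 1) := by
        rw [Nat.div_div_eq_div_mul, ← pow_succ']
      simp [this]
  · refine ⟨0, by simp, by simpa using hdvd, ?_⟩
    have hmod' : ¬ ((I:Int) ∣ (N:Int)) := by exact_mod_cast hdvd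
    simp [pfStrip, hmod']

def GoodItems (M j : ℕ) (l : List (Int × Int)) : Prop :=
  ∀ pe ∈ l, ∃ p : ℕ, pe.1 = (p : Int) ∧ p.Prime ∧ p < j ∧
    pe.2 = (M.factorization p : ℕ) ∧ 0 < M.factorization p

def TDInv (M j : ℕ) (d : PySem.Dict Int Int) (r : ℕ) : Prop :=
  1 ≤ r ∧ r ∣ M ∧
  (∀ p : ℕ, p.Prime → p < j → ¬ p ∣ r) ∧
  (∀ p : ℕ, p.Prime → j ≤ p → r.factorization p = M.factorization p) ∧
  GoodItems M j d.items ∧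
  (∀ p : ℕ, p.Prime → p < j → p ∣ M → ((p : Int) ∈ d.keys))

theorem inv_fresh {M j : ℕ} {d : PySem.Dict Int Int} {r : ℕ} (h : TDInv M j d r)
    {i : ℕ} (hi : j ≤ i) : d.contains (i : Int) = false := by
  obtain ⟨-, -, -, -, hitems, -⟩ := h
  by_contra hc
  have hc' : d.contains (i : Int) = true := by simpa using hc
  rw [PySem.Dict.contains_iff_mem_keys] at hc'
  simp only [PySem.Dict.keys, List.mem_map] at hc'
  obtain ⟨pe, hpe, hfst⟩ := hc'
  obtain ⟨p, hp1, _, hplt, -, -⟩ := hitems pe hpe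
  rw [hp1] at hfst
  have : p = i := by exact_mod_cast hfst
  omega


theorem inv_step {M j : ℕ} {d : PySem.Dict Int Int} {r : ℕ} (hM : 1 ≤ M)
    (h : TDInv M j d r) (hj : 3 ≤ j) (hodd : j % 2 = 1) (fuel : Nat) (hfuel : r ≤ fuel) :
    ∃ (d' : PySem.Dict Int Int) (r' : ℕ),
      pfStrip (j : Int) fuel (d, (r : Int)) = (d', ((r' : ℕ) : Int)) ∧ r' ∣ r ∧ TDInv M (j + 2) d' r' := by
  obtain ⟨hr1, hrM, hC2, hC3, hitems, hC5⟩ := h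
  have hMne : M ≠ 0 := by omega
  have hrne : r ≠ 0 := by omega
  have hfresh := inv_fresh ⟨hr1, hrM, hC2, hC3, hitems, hC5⟩ (le_refl j)
  obtain ⟨e, hd, hnd, heq⟩ := pfStrip_spec j (by omega) fuel d r hr1 hfuel hfresh
  have hsucc_np : ¬ (j + 1).Prime := by
    intro hp
    have : j + 1 = 2 := (Nat.Prime.even_iff hp).mp (Nat.even_iff.mpr (by omega))
    omega
  by_cases hjp : j.Prime
  · have hefact : r.factorization j = e := fac_eq_of_pow_dvd hjp hrne hd hnd
    have heM : M.factorization j = e := by rw [← hC3 j hjp (le_refl j)]; exact hefact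
    have hpowpos : 0 < j ^ e := by positivity
    have hr'dvd : r / j ^ e ∣ r := Nat.div_dvd_of_dvd hd
    have hr'1 : 1 ≤ r / j ^ e := Nat.one_le_div_iff hpowpos |>.mpr (Nat.le_of_dvd (by omega) hd)
    have hfacdiv : ∀ p : ℕ, (r / j ^ e).factorization p
        = r.factorization p - (j ^ e).factorization p := by
      intro p
      rw [Nat.factorization_div hd]
      rfl
    refine ⟨_, r / j ^ e, by rw [heq], hr'dvd, hr'1, dvd_trans hr'dvd hrM, ?_, ?_, ?_, ?_⟩
    · intro p hp hplt
      rcases (by omega : p < j ∨ p = j ∨ p = j + 1) with hc | hc | hc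
      · exact fun hdd => hC2 p hp hc (dvd_trans hdd hr'dvd)
      · subst hc; exact hnd
      · subst hc; exact absurd hp hsucc_np
    · intro p hp hple
      rw [hfacdiv, Nat.Prime.factorization_pow hjp]
      have hpj : j ≠ p := by omega
      simp [hpj, hC3 p hp (by omega)]
    · by_cases he : e = 0
      · subst he
        simp only [reduceIte]
        intro pe hpe
        obtain ⟨p, h1, h2, h3, h4, h5⟩ := hitems pe hpe
        exact ⟨p, h1, h2, by omega, h4, h5⟩
      · rw [if_neg he]
        intro pe hpe
        rw [PySem.Dict.items_insert_of_not_contains _ _ hfresh] at hpe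
        rcases List.mem_append.mp hpe with hin | hin
        · obtain ⟨p, h1, h2, h3, h4, h5⟩ := hitems pe hin
          exact ⟨p, h1, h2, by omega, h4, h5⟩
        · simp only [List.mem_singleton] at hin
          subst hin
          exact ⟨j, rfl, hjp, by omega, by rw [heM], by omega⟩
    · intro p hp hplt hpM
      by_cases he : e = 0
      · subst he
        simp only [reduceIte]
        rcases (by omega : p < j ∨ p = j ∨ p = j + 1) with hc | hc | hc
        · exact hC5 p hp hc hpM
        · subst hc
          have : 0 < M.factorization p := Nat.Prime.factorization_pos_of_dvd hp hMne hpM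
          omega
        · subst hc; exact absurd hp hsucc_np
      · rw [if_neg he]
        rcases (by omega : p < j ∨ p = j ∨ p = j + 1) with hc | hc | hc
        · exact (PySem.Dict.mem_keys_insert _ _ _ _).mpr (Or.inr (hC5 p hp hc hpM))
        · subst hc; exact (PySem.Dict.mem_keys_insert _ _ _ _).mpr (Or.inl rfl)
        · subst hc; exact absurd hp hsucc_np
  · have he0 : e = 0 := by
      by_contra hne
      have hjr : j ∣ r := dvd_trans (dvd_pow_self j hne) hd
      obtain ⟨p, hp, hpj⟩ := Nat.exists_prime_and_dvd (by omega : j ≠ 1)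
      have hplt : p < j := lt_of_le_of_ne (Nat.le_of_dvd (by omega) hpj)
        (fun hc => hjp (hc ▸ hp))
      exact hC2 p hp hplt (dvd_trans hpj hjr)
    subst he0
    simp only [reduceIte, pow_zero, Nat.div_one] at heq
    refine ⟨d, r, by rw [heq], dvd_refl r, hr1, hrM, ?_, ?_, ?_, ?_⟩
    · intro p hp hplt
      rcases (by omega : p < j ∨ p = j ∨ p = j + 1) with hc | hc | hc
      · exact hC2 p hp hc
      · subst hc; exact absurd hp hjp
      · subst hc; exact absurd hp hsucc_np
    · intro p hp hple
      exact hC3 p hp (by omega)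
    · intro pe hpe
      obtain ⟨p, h1, h2, h3, h4, h5⟩ := hitems pe hpe
      exact ⟨p, h1, h2, by omega, h4, h5⟩
    · intro p hp hplt hpM
      rcases (by omega : p < j ∨ p = j ∨ p = j + 1) with hc | hc | hc
      · exact hC5 p hp hc hpM
      · subst hc; exact absurd hp hjp
      · subst hc; exact absurd hp hsucc_np

theorem inv_fold {M : ℕ} (hM : 1 ≤ M) :
    ∀ (T : ℕ) {d : PySem.Dict Int Int} {r : ℕ}, TDInv M 3 d r →
    ∃ (d' : PySem.Dict Int Int) (r' : ℕ), (List.range T).foldl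
        (fun st (t : ℕ) => pfStrip ((3 : Int) + 2 * (t : Int)) (st.2.natAbs + 1) st) (d, (r : Int))
        = (d', ((r' : ℕ) : Int)) ∧ r' ∣ r ∧ TDInv M (3 + 2 * T) d' r' := by
  intro T
  induction T with
  | zero => intro d r h; exact ⟨d, r, rfl, dvd_refl r, h⟩
  | succ T ih =>
    intro d r h
    obtain ⟨d1, r1, heq1, hdvd1, hinv1⟩ := ih h
    have hodd : (3 + 2 * T) % 2 = 1 := by omega
    obtain ⟨d2, r2, heq2, hdvd2, hinv2⟩ := inv_step hM hinv1 (by omega) hodd (r1 + 1) (by omega)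
    refine ⟨d2, r2, ?_, dvd_trans hdvd2 hdvd1, ?_⟩
    · rw [List.range_succ, List.foldl_append, heq1]
      simp only [List.foldl_cons, List.foldl_nil]
      have hcast : ((3 : Int) + 2 * (T : Int)) = (((3 + 2 * T : ℕ) : ℕ) : Int) := by push_cast; ring
      have habs : (((r1 : ℕ) : Int)).natAbs + 1 = r1 + 1 := by simp
      rw [hcast, habs]
      exact heq2
    · have : 3 + 2 * (T + 1) = (3 + 2 * T) + 2 := by ring
      rw [this]
      exact hinv2

theorem prime_factors_spec {M : ℕ} (hM : 1 ≤ M) :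
    ∃ l : List (Int × Int), (prime_factors (M : Int)).items = l ∧
      GoodItems M (M + 2) l ∧
      (∀ p : ℕ, p.Prime → p ∣ M → ((p : Int) ∈ l.map Prod.fst)) := by
  have hMne : M ≠ 0 := by omega
  -- step 1: strip the twos
  have hfresh0 : (PySem.Dict.empty : PySem.Dict Int Int).contains (2 : Int) = false := rfl
  obtain ⟨e2, hd2, hnd2, heq2⟩ := pfStrip_spec 2 (le_refl 2) ((M : Int).natAbs + 1)
    PySem.Dict.empty M hM (by simp) hfresh0
  simp only [Int.natAbs_natCast, Nat.cast_ofNat] at heq2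
  set R := M / 2 ^ e2 with hRdef
  have hR1 : 1 ≤ R := Nat.one_le_div_iff (by positivity) |>.mpr (Nat.le_of_dvd (by omega) hd2)
  have hRdvd : R ∣ M := Nat.div_dvd_of_dvd hd2
  have hfac2 : M.factorization 2 = e2 := fac_eq_of_pow_dvd Nat.prime_two hMne hd2 hnd2
  have hinv1 : TDInv M 3 (if e2 = 0 then (PySem.Dict.empty : PySem.Dict Int Int)
      else PySem.Dict.empty.insert (2:Int) (e2:Int)) R := by
    refine ⟨hR1, hRdvd, ?_, ?_, ?_, ?_⟩
    · intro p hp hplt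
      have : p = 2 := by have := hp.two_le; omega
      subst this; exact hnd2
    · intro p hp hple
      rw [hRdef, Nat.factorization_div hd2, Nat.Prime.factorization_pow Nat.prime_two]
      have hp2 : (2:ℕ) ≠ p := by omega
      simp [hp2]
    · by_cases he : e2 = 0
      · subst he; simp only [reduceIte]
        intro pe hpe
        simp only [show (PySem.Dict.empty : PySem.Dict Int Int).items = [] from rfl] at hpe
        exact absurd hpe (List.not_mem_nil)
      · rw [if_neg he]
        intro pe hpe
        rw [PySem.Dict.items_insert_of_not_contains _ _ hfresh0] at hpe
        simp only [show (PySem.Dict.empty : PySem.Dict Int Int).items = [] from rfl,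
          List.nil_append, List.mem_singleton] at hpe
        subst hpe
        exact ⟨2, rfl, Nat.prime_two, by omega, by rw [hfac2], by omega⟩
    · intro p hp hplt hpM
      have hp2 : p = 2 := by have := hp.two_le; omega
      subst hp2
      have he : e2 ≠ 0 := by
        intro h0
        rw [h0] at hfac2
        have := Nat.Prime.factorization_pos_of_dvd Nat.prime_two hMne hpM
        omega
      rw [if_neg he]
      exact (PySem.Dict.mem_keys_insert _ _ _ _).mpr (Or.inl rfl)
  -- step 2: the odd loop
  set S := R.sqrt with hSdef
  have hSM : S ≤ M := le_trans (Nat.sqrt_le_self R) (Nat.le_of_dvd (by omega) hRdvd)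
  set L : ℕ := if 3 ≤ S then (S - 1) / 2 else 0 with hLdef
  have hrange : PySem.List.pyRange 3 ((S : Int) + 1) 2
      = (List.range L).map (fun k : ℕ => (3 : Int) + 2 * (k : Int)) := by
    rw [PySem.List.pyRange_of_pos _ _ (by omega : (0:Int) < 2)]
    congr 1
    by_cases hS3 : 3 ≤ S
    · rw [hLdef, if_pos hS3, if_pos (by exact_mod_cast by omega : (3:Int) < (S:Int)+1)]
      have : ((S : Int) + 1 - 3 + 2 - 1) = (((S - 1 : ℕ) : ℕ) : Int) := by omega
      rw [this]
      congr 1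
    · rw [hLdef, if_neg hS3, if_neg (by omega)]
  have hjendS : S < 3 + 2 * L := by
    by_cases hS3 : 3 ≤ S
    · rw [hLdef, if_pos hS3]; omega
    · rw [hLdef, if_neg hS3]; omega
  have hjendM : 3 + 2 * L ≤ M + 2 := by
    by_cases hS3 : 3 ≤ S
    · rw [hLdef, if_pos hS3]; omega
    · rw [hLdef, if_neg hS3]; omega
  obtain ⟨d', r', heqf, hdvd', hinvf⟩ := inv_fold hM L hinv1
  obtain ⟨hr'1, hr'M, hC2, hC3, hitems, hC5⟩ := hinvf
  have hr'R : r' ≤ R := Nat.le_of_dvd (by omega) hdvd'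
  -- assemble the port expression
  have hpf : prime_factors (M : Int) =
      (if ((r' : ℕ) : Int) > 2 then d'.insert ((r' : ℕ) : Int) 1 else d') := by
    show (let st := pfStrip 2 ((M : Int).natAbs + 1) (PySem.Dict.empty, (M:Int))
      let st := (PySem.List.pyRange 3 (pySqrtInt st.2 + 1) 2).foldl
        (fun st i => pfStrip i (st.2.natAbs + 1) st) st
      if st.2 > 2 then st.1.insert st.2 1 else st.1) = _
    rw [show ((M:Int).natAbs + 1) = M + 1 from by simp, heq2]
    simp only
    rw [show pySqrtInt ((R : ℕ) : Int) = ((S : ℕ) : Int) by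
      simp [pySqrtInt, hSdef]]
    rw [hrange, List.foldl_map]
    rw [heqf]
  by_cases hbig : 2 < r'
  · -- leftover prime
    have hr'p : r'.Prime := by
      by_contra hnp
      have hq := Nat.minFac_prime (by omega : r' ≠ 1)
      have hqd : r'.minFac ∣ r' := Nat.minFac_dvd r'
      have hqge : 3 + 2 * L ≤ r'.minFac := by
        by_contra hlt
        exact hC2 r'.minFac hq (by omega) hqd
      have hsq : r'.minFac ^ 2 ≤ r' := Nat.minFac_sq_le_self (by omega) hnp
      have hRlt : R < r'.minFac ^ 2 := Nat.sqrt_lt'.mp (show R.sqrt < r'.minFac by omega)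
      omega
    have hge : 3 + 2 * L ≤ r' := by
      by_contra hlt
      exact hC2 r' hr'p (by omega) (dvd_refl r')
    have hfacr' : M.factorization r' = 1 := by
      rw [← hC3 r' hr'p hge, Nat.Prime.factorization_self hr'p]
    have hfreshr' : d'.contains ((r' : ℕ) : Int) = false :=
      inv_fresh ⟨hr'1, hr'M, hC2, hC3, hitems, hC5⟩ hge
    refine ⟨d'.items ++ [(((r' : ℕ) : Int), 1)], ?_, ?_, ?_⟩
    · rw [hpf, if_pos (by exact_mod_cast hbig), PySem.Dict.items_insert_of_not_contains _ _ hfreshr']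
    · intro pe hpe
      rcases List.mem_append.mp hpe with hin | hin
      · obtain ⟨p, h1, h2, h3, h4, h5⟩ := hitems pe hin
        exact ⟨p, h1, h2, by omega, h4, h5⟩
      · simp only [List.mem_singleton] at hin
        subst hin
        refine ⟨r', rfl, hr'p, ?_, by simp [hfacr'], by rw [hfacr']; exact one_pos⟩
        have : r' ≤ M := Nat.le_of_dvd (by omega) hr'M
        omega
    · intro p hp hpM
      rw [List.map_append, List.mem_append]
      by_cases hplt : p < 3 + 2 * L
      · left
        have := hC5 p hp hplt hpM
        simpa [PySem.Dict.keys] using this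
      · right
        have hfe : r'.factorization p = M.factorization p := hC3 p hp (by omega)
        have hpos : 0 < M.factorization p := Nat.Prime.factorization_pos_of_dvd hp hMne hpM
        have hpdvd : p ∣ r' := by
          rw [Nat.Prime.dvd_iff_one_le_factorization hp (by omega)]
          omega
        have : p = r' := ((Nat.prime_dvd_prime_iff_eq hp hr'p).mp hpdvd)
        simp [this]
  · -- leftover is 1
    have hr'eq : r' = 1 := by
      rcases (by omega : r' = 1 ∨ r' = 2) with h | h
      · exact h
      · exfalso
        exact hC2 2 Nat.prime_two (by omega) (h ▸ dvd_refl r')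
    refine ⟨d'.items, ?_, ?_, ?_⟩
    · rw [hpf, if_neg (by exact_mod_cast hbig)]
    · intro pe hpe
      obtain ⟨p, h1, h2, h3, h4, h5⟩ := hitems pe hpe
      exact ⟨p, h1, h2, by omega, h4, h5⟩
    · intro p hp hpM
      by_cases hplt : p < 3 + 2 * L
      · have := hC5 p hp hplt hpM
        simpa [PySem.Dict.keys] using this
      · exfalso
        have hfe : r'.factorization p = M.factorization p := hC3 p hp (by omega)
        have hpos : 0 < M.factorization p := Nat.Prime.factorization_pos_of_dvd hp hMne hpM
        rw [hr'eq] at hfe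
        simp [Nat.factorization_one] at hfe
        omega

theorem dfCount_cast (p N : ℕ) (hp : 2 ≤ p) :
    ∀ (fuel j : ℕ) (count : Int), N < p ^ (j + fuel) → 1 ≤ j →
    dfCount (N : Int) (p : Int) fuel count ((p : Int) ^ j) =
      count + ((∑ i ∈ Finset.Ico j (j + fuel), N / p ^ i : ℕ) : Int) := by
  intro fuel
  induction fuel with
  | zero => intro j count _ _; rw [dfCount]; simp
  | succ f ih =>
    intro j count hlt hj
    by_cases hle : p ^ j ≤ N
    · have hle' : ((p : Int) ^ j ≤ (N : Int)) := by exact_mod_cast hle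
      rw [show dfCount (N : Int) (p : Int) (f+1) count ((p : Int) ^ j)
          = dfCount (N : Int) (p : Int) f (count + PySem.Int.floordiv (N:Int) ((p:Int)^j)) ((p:Int)^j * p)
          from by rw [dfCount]; rw [if_pos hle']]
      have hflo : PySem.Int.floordiv (N:Int) ((p:Int)^j) = ((N / p ^ j : ℕ) : Int) := by
        rw [show ((p:Int)^j) = ((p^j : ℕ) : Int) by push_cast; ring]
        exact PySem.Int.floordiv_natCast N (p^j)
      rw [hflo, show ((p:Int)^j * p) = (p:Int)^(j+1) from by ring]
      rw [ih (j+1) _ (by rw [show j+1+f = j + (f+1) from by omega]; exact hlt) (by omega)]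
      have hsplit : ∑ i ∈ Finset.Ico j (j + (f+1)), N / p ^ i
          = N / p ^ j + ∑ i ∈ Finset.Ico (j+1) (j+1+f), N / p ^ i := by
        rw [show j + (f+1) = j+1+f from by omega]
        rw [← Finset.sum_eq_sum_Ico_succ_bot (by omega : j < j+1+f) (fun i => N / p ^ i)]
      rw [hsplit]
      push_cast
      ring
    · rw [show dfCount (N : Int) (p : Int) (f+1) count ((p : Int) ^ j) = count
          from by rw [dfCount]; rw [if_neg (by exact_mod_cast hle)]]
      have : ∀ i ∈ Finset.Ico j (j + (f+1)), N / p ^ i = 0 := by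
        intro i hi
        simp only [Finset.mem_Ico] at hi
        apply Nat.div_eq_of_lt
        calc N < p ^ j := by omega
        _ ≤ p ^ i := Nat.pow_le_pow_right (by omega) hi.1
      rw [Finset.sum_congr rfl this]
      simp

set_option maxHeartbeats 1000000 in
theorem dfCount_eq_factorization {p : ℕ} (hp : p.Prime) (n : Int) (hn : n ≤ 2147483648) :
    dfCount n (p : ℕ) 64 0 (p : ℕ) = (((n.toNat).factorial.factorization p : ℕ) : Int) := by
  have hp2 := hp.two_le
  by_cases hpos : 1 ≤ n
  · set N := n.toNat with hN
    have hn' : n = (N : Int) := by omega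
    have hNle : N ≤ 2147483648 := by omega
    have hlt : N < p ^ (1 + 64) := by
      calc N ≤ 2147483648 := hNle
      _ < 2 ^ 65 := by norm_num
      _ ≤ p ^ 65 := Nat.pow_le_pow_left hp2 65
    have := dfCount_cast p N hp2 64 1 0 hlt (le_refl 1)
    rw [pow_one] at this
    rw [hn', this, zero_add]
    have hfact : (N.factorial.factorization p) = ∑ i ∈ Finset.Ico 1 (1+64), N / p ^ i :=
      Nat.factorization_factorial hp (show Nat.log p N < 1 + 64 by
      have h1 : Nat.log p N ≤ Nat.log 2 N := Nat.log_anti_left (by norm_num) hp2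
      have h2 : Nat.log 2 N < 32 := Nat.log_lt_of_lt_pow (by omega)
        (by calc N ≤ 2147483648 := hNle
            _ < 2 ^ 32 := by norm_num)
      omega)
    rw [hfact]
  · have hng : ¬ ((p : Int) ≤ n) := by
      push Not
      calc n < 1 := by omega
      _ ≤ (p : Int) := by exact_mod_cast by omega
    rw [show dfCount n (p:Int) 64 0 (p:Int) = 0 from by rw [dfCount, if_neg hng]]
    have : n.toNat = 0 := by omega
    rw [this]
    simp [Nat.factorization_one]

theorem A_iff (n m : Int) (hDom : Dom_divides_factorial n m) (hm : 1 ≤ m) :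
    (divides_factorial n m = true ↔ m.toNat ∣ (n.toNat).factorial) := by
  have hn31 : n ≤ 2147483648 := by
    simp only [Dom_divides_factorial, pvDomInt, Bool.and_eq_true, decide_eq_true_eq] at hDom
    exact hDom.1.2
  set M := m.toNat with hM
  have hM1 : 1 ≤ M := by omega
  have hMne : M ≠ 0 := by omega
  have hmM : m = (M : Int) := by omega
  have hfne : (n.toNat).factorial ≠ 0 := Nat.factorial_ne_zero _
  obtain ⟨l, hl, hgood, hcompl⟩ := prime_factors_spec hM1
  rw [show divides_factorial n m
      = (prime_factors m).items.all (fun pe => !decide (dfCount n pe.1 64 0 pe.1 < pe.2))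
      from by rw [divides_factorial, if_neg (by omega)]]
  rw [hmM, hl]
  rw [List.all_eq_true]
  constructor
  · intro hall
    apply (Nat.factorization_le_iff_dvd hMne hfne).mp
    rw [Finsupp.le_def]
    intro q
    by_cases hq : q.Prime
    · by_cases hqM : q ∣ M
      · obtain ⟨pe, hpe, hfst⟩ := List.mem_map.mp (hcompl q hq hqM)
        have := hall pe hpe
        obtain ⟨p, h1, hp, -, h4, -⟩ := hgood pe hpe
        have hpq : p = q := by rw [h1] at hfst; exact_mod_cast hfst
        subst hpq
        rw [Bool.not_eq_eq_eq_not, Bool.not_true, decide_eq_false_iff_not, not_lt] at this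
        rw [h1, h4] at this
        rw [dfCount_eq_factorization hp n hn31] at this
        exact_mod_cast this
      · rw [Nat.factorization_eq_zero_of_not_dvd hqM]
        omega
    · rw [(Nat.factorization_eq_zero_iff M q).mpr (Or.inl hq)]
      omega
  · intro hdvd pe hpe
    obtain ⟨p, h1, hp, -, h4, -⟩ := hgood pe hpe
    rw [Bool.not_eq_eq_eq_not, Bool.not_true, decide_eq_false_iff_not, not_lt]
    rw [h1, h4, dfCount_eq_factorization hp n hn31]
    have hle := (Nat.factorization_le_iff_dvd hMne hfne).mpr hdvd
    rw [Finsupp.le_def] at hle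
    exact_mod_cast hle p

def gstep (r k : ℕ) : ℕ := r / r.gcd k
def gfold (r : ℕ) : ℕ → ℕ
  | 0 => r
  | T+1 => if T + 1 ≤ 1 then r else gstep (gfold r T) (T + 1)

theorem gstep_pos {r : ℕ} (k : ℕ) (hr : 1 ≤ r) : 1 ≤ gstep r k := by
  have hg : r.gcd k ∣ r := Nat.gcd_dvd_left r k
  have hgpos : 0 < r.gcd k := Nat.gcd_pos_of_pos_left k (by omega)
  exact Nat.one_le_div_iff hgpos |>.mpr (Nat.le_of_dvd (by omega) hg)

theorem gfold_pos {r : ℕ} (hr : 1 ≤ r) : ∀ T, 1 ≤ gfold r T := by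
  intro T
  induction T with
  | zero => exact hr
  | succ T ih =>
    rw [gfold]
    by_cases h : T + 1 ≤ 1
    · rw [if_pos h]; exact hr
    · rw [if_neg h]; exact gstep_pos _ ih

theorem altStep_cast (r k : ℕ) : altStep (r : Int) (k : Int) = ((gstep r k : ℕ) : Int) := by
  rw [altStep, gstep, Int.gcd_natCast_natCast, PySem.Int.floordiv_natCast]

theorem alt_fold_cast (r : ℕ) (_hr : 1 ≤ r) (X : ℕ) :
    (PySem.List.pyRange 2 ((X : Int) + 1) 1).foldl altStep (r : Int) = ((gfold r X : ℕ) : Int) := by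
  induction X with
  | zero =>
    rw [PySem.List.pyRange_one_eq_nil (by omega)]
    simp [gfold]
  | succ X ih =>
    by_cases hX : X = 0
    · subst hX
      rw [PySem.List.pyRange_one_eq_nil (by omega)]
      simp [gfold]
    · have h2X : 2 ≤ X + 1 := by omega
      rw [show ((X + 1 : ℕ) : Int) + 1 = ((X : Int) + 1) + 1 from by push_cast; ring]
      rw [PySem.List.pyRange_one_succ_right (by exact_mod_cast by omega : (2:Int) ≤ (X:Int)+1)]
      rw [List.foldl_append, ih]
      simp only [List.foldl_cons, List.foldl_nil]
      rw [show ((X : Int) + 1) = ((X + 1 : ℕ) : Int) from by push_cast; ring]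
      rw [altStep_cast]
      congr 1
      rw [show gfold r (X + 1) = gstep (gfold r X) (X + 1) from by
        rw [gfold, if_neg (by omega)]]

theorem gfold_factorization {m : ℕ} (hm : 1 ≤ m) (T : ℕ) :
    gfold m T ∣ m ∧
    ∀ p : ℕ, (gfold m T).factorization p =
      m.factorization p - (T.factorial).factorization p := by
  induction T with
  | zero => exact ⟨dvd_refl m, fun p => by simp [gfold, Nat.factorization_one, Nat.factorial]⟩
  | succ T ih =>
    obtain ⟨hdvd, hfac⟩ := ih
    by_cases h1 : T + 1 ≤ 1
    · have : T = 0 := by omega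
      subst this
      refine ⟨by rw [gfold, if_pos h1], fun p => by rw [gfold, if_pos h1]; simp [Nat.factorization_one, Nat.factorial]⟩
    · have hTge : 2 ≤ T + 1 := by omega
      set r := gfold m T with hr
      have hrpos : 1 ≤ r := gfold_pos hm T
      have hgd : r.gcd (T+1) ∣ r := Nat.gcd_dvd_left _ _
      have hgpos : 0 < r.gcd (T+1) := Nat.gcd_pos_of_pos_left _ (by omega)
      have hstep : gfold m (T+1) = r / r.gcd (T+1) := by
        rw [gfold, if_neg h1, gstep]
      constructor
      · rw [hstep]
        exact dvd_trans (Nat.div_dvd_of_dvd hgd) hdvd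
      · intro p
        rw [hstep, Nat.factorization_div hgd]
        rw [Finsupp.tsub_apply]
        rw [Nat.factorization_gcd (by omega) (by omega)]
        rw [Finsupp.inf_apply]
        rw [hfac p]
        rw [Nat.factorial_succ, Nat.factorization_mul (by omega) (Nat.factorial_ne_zero T)]
        rw [Finsupp.add_apply]
        rcases le_total (m.factorization p - T.factorial.factorization p) ((T+1).factorization p) with h | h
        · rw [min_eq_left h]; omega
        · rw [min_eq_right h]; omega

theorem tp_le {p : ℕ} (hp : 2 ≤ p) : ∀ t : ℕ, 1 ≤ t → t * p ≤ p ^ t := by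
  intro t
  induction t with
  | zero => omega
  | succ t ih =>
    intro _
    by_cases ht : t = 0
    · subst ht; simp
    · have h1 := ih (by omega)
      have h2 : p ^ t ≥ 2 := by
        calc 2 ≤ p := hp
        _ = p ^ 1 := (pow_one p).symm
        _ ≤ p ^ t := Nat.pow_le_pow_right (by omega) (by omega)
      calc (t + 1) * p = t * p + p := by ring
      _ ≤ p ^ t + p := by omega
      _ ≤ p ^ t + p ^ t := by
          have : p ≤ p ^ t := by
            calc p = p ^ 1 := (pow_one p).symm
            _ ≤ p ^ t := Nat.pow_le_pow_right (by omega) (by omega)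
          omega
      _ = 2 * p ^ t := by ring
      _ ≤ p * p ^ t := Nat.mul_le_mul_right _ hp
      _ = p ^ (t + 1) := by ring

theorem ep_mul_le {p e M : ℕ} (hp : 2 ≤ p) (hM : M ≤ 2147483648)
    (hd : p ^ e ∣ M) (hM1 : 1 ≤ M) (hps : p ≤ M.sqrt) : e * p ≤ 64 + 2 * M.sqrt := by
  have hpe : p ^ e ≤ M := Nat.le_of_dvd (by omega) hd
  rcases (by omega : e = 0 ∨ e = 1 ∨ 2 ≤ e) with he | he | he
  · subst he; omega
  · subst he; omega
  · set t := e / 2 with ht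
    have ht1 : 1 ≤ t := by omega
    have htp : t * p ≤ p ^ t := tp_le hp t ht1
    have hp2t : p ^ (2 * t) ≤ M := by
      calc p ^ (2 * t) ≤ p ^ e := Nat.pow_le_pow_right (by omega) (by omega)
      _ ≤ M := hpe
    have hsq : p ^ t ≤ M.sqrt := by
      apply Nat.le_sqrt.mpr
      calc p ^ t * p ^ t = p ^ (2 * t) := by rw [← pow_add]; congr 1; omega
      _ ≤ M := hp2t
    rcases (by omega : e = 2 * t ∨ e = 2 * t + 1) with hev | hod
    · rw [hev]
      calc 2 * t * p = 2 * (t * p) := by ring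
      _ ≤ 2 * p ^ t := by omega
      _ ≤ 2 * M.sqrt := by omega
      _ ≤ 64 + 2 * M.sqrt := by omega
    · by_cases hsmall : p ≤ 64
      · rw [hod]
        calc (2 * t + 1) * p = 2 * (t * p) + p := by ring
        _ ≤ 2 * p ^ t + 64 := by omega
        _ ≤ 64 + 2 * M.sqrt := by omega
      · -- p ≥ 65: 64 * p^(2t) ≤ p^(2t+1) ≤ M, so 8 * p^t ≤ sqrt M
        have h64 : 64 * p ^ (2 * t) ≤ M := by
          calc 64 * p ^ (2 * t) ≤ p * p ^ (2 * t) := Nat.mul_le_mul_right _ (by omega)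
          _ = p ^ (2 * t + 1) := by ring
          _ = p ^ e := by rw [hod]
          _ ≤ M := hpe
        have h8 : 8 * p ^ t ≤ M.sqrt := by
          apply Nat.le_sqrt.mpr
          have hpt : p ^ (2 * t) = p ^ t * p ^ t := by
            rw [show 2 * t = t + t from by omega, pow_add]
          nlinarith [h64]
        rw [hod]
        calc (2 * t + 1) * p ≤ 3 * (t * p) := by nlinarith
        _ ≤ 3 * p ^ t := by omega
        _ ≤ 16 * p ^ t := by omega
        _ = 2 * (8 * p ^ t) := by ring
        _ ≤ 2 * M.sqrt := by omega
        _ ≤ 64 + 2 * M.sqrt := by omega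

theorem fact_factorial_ge {p K : ℕ} (hp : p.Prime) (hK : 1 ≤ K) :
    K / p ≤ (K.factorial).factorization p := by
  rw [Nat.factorization_factorial hp (show Nat.log p K < K + 1 from by
    have := Nat.log_le_self p K; omega)]
  have h1 : (1 : ℕ) ∈ Finset.Ico 1 (K + 1) := by
    simp [Finset.mem_Ico]; omega
  calc K / p = K / p ^ 1 := by rw [pow_one]
  _ ≤ ∑ i ∈ Finset.Ico 1 (K + 1), K / p ^ i :=
      Finset.single_le_sum (f := fun i => K / p ^ i) (fun i _ => Nat.zero_le _) h1

theorem absorbed {M : ℕ} (hM : 1 ≤ M) (hMle : M ≤ 2147483648) {p : ℕ} (hp : p.Prime)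
    (hpK : p ≤ 2 * M.sqrt + 64) :
    M.factorization p ≤ ((2 * M.sqrt + 64).factorial).factorization p := by
  have hMne : M ≠ 0 := by omega
  set e := M.factorization p with he
  have hpd : p ^ e ∣ M := (Nat.Prime.pow_dvd_iff_le_factorization hp hMne).mpr (le_refl e)
  by_cases hps : p ≤ M.sqrt
  · have hep := ep_mul_le hp.two_le hMle hpd hM hps
    have hediv : e ≤ (2 * M.sqrt + 64) / p := by
      rw [Nat.le_div_iff_mul_le hp.pos]
      omega
    calc e ≤ (2 * M.sqrt + 64) / p := hediv
    _ ≤ ((2 * M.sqrt + 64).factorial).factorization p := fact_factorial_ge hp (by omega)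
  · have he1 : e ≤ 1 := by
      by_contra h2
      have : p ^ 2 ∣ M := dvd_trans (pow_dvd_pow p (by omega)) hpd
      have : p ^ 2 ≤ M := Nat.le_of_dvd (by omega) this
      have : p ≤ M.sqrt := Nat.le_sqrt.mpr (by nlinarith)
      omega
    have : p ∣ (2 * M.sqrt + 64).factorial := (Nat.Prime.dvd_factorial hp).mpr hpK
    have := Nat.Prime.factorization_pos_of_dvd hp (Nat.factorial_ne_zero _) this
    omega

theorem gfold_eq_one_iff {M T : ℕ} (hM : 1 ≤ M) :
    (gfold M T = 1 ↔ M ∣ T.factorial) := by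
  obtain ⟨hdvd, hfac⟩ := gfold_factorization hM T
  have hfne : T.factorial ≠ 0 := Nat.factorial_ne_zero T
  constructor
  · intro h1
    apply (Nat.factorization_le_iff_dvd (by omega) hfne).mp
    rw [Finsupp.le_def]
    intro q
    have := hfac q
    rw [h1] at this
    simp [Nat.factorization_one] at this
    omega
  · intro hMd
    have hle := (Nat.factorization_le_iff_dvd (by omega) hfne).mpr hMd
    rw [Finsupp.le_def] at hle
    by_contra hne
    obtain ⟨q, hq, hqd⟩ := Nat.exists_prime_and_dvd hne
    have hpos : 0 < (gfold M T).factorization q :=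
      Nat.Prime.factorization_pos_of_dvd hq (by have := gfold_pos hM T; omega) hqd
    have := hfac q
    have := hle q
    omega

theorem B_iff (n m : Int) (hDom : Dom_divides_factorial n m) (hm : 1 ≤ m) :
    (divides_factorial_alt n m = true ↔ m.toNat ∣ (n.toNat).factorial) := by
  have hdom' : m ≤ 2147483648 := by
    simp only [Dom_divides_factorial, pvDomInt, Bool.and_eq_true, decide_eq_true_eq] at hDom
    exact hDom.2.2
  set M := m.toNat with hMdef
  have hM1 : 1 ≤ M := by omega
  have hMle : M ≤ 2147483648 := by omega
  have hmM : m = (M : Int) := by omega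
  set K := 2 * M.sqrt + 64 with hKdef
  have hKcast : (2 : Int) * ((M.sqrt : ℕ) : Int) + 64 = ((K : ℕ) : Int) := by
    rw [hKdef]; push_cast; ring
  rw [show divides_factorial_alt n m
      = (if n ≤ 2 * ((m.toNat.sqrt : ℕ) : Int) + 64 then
          decide ((PySem.List.pyRange 2 (n + 1) 1).foldl altStep m = 1)
        else
          decide ((PySem.List.pyRange 2 ((2 * ((m.toNat.sqrt : ℕ) : Int) + 64) + 1) 1).foldl altStep m ≤ n))
      from by rw [divides_factorial_alt, if_neg (by omega)]]
  rw [← hMdef, hKcast, hmM]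
  by_cases hle : n ≤ ((K : ℕ) : Int)
  · rw [if_pos hle]
    by_cases hn2 : n < 2
    · -- empty range: the fold returns m itself
      rw [PySem.List.pyRange_one_eq_nil (by omega)]
      simp only [List.foldl_nil]
      have hNfac : (n.toNat).factorial = 1 := by
        rcases (by omega : n.toNat = 0 ∨ n.toNat = 1) with h | h <;> rw [h] <;> rfl
      rw [hNfac]
      simp only [decide_eq_true_eq, Nat.dvd_one]
      constructor
      · intro h; exact_mod_cast h
      · intro h; exact_mod_cast h
    · set N := n.toNat with hNdef
      have hnN : n = (N : Int) := by omega
      rw [hnN, alt_fold_cast M hM1 N]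
      simp only [decide_eq_true_eq]
      rw [show (((gfold M N : ℕ) : Int) = 1 ↔ gfold M N = 1) from by exact_mod_cast Iff.rfl]
      exact gfold_eq_one_iff hM1
  · rw [if_neg hle]
    have hnK : ((K : ℕ) : Int) < n := by omega
    set N := n.toNat with hNdef
    have hKN : K < N := by omega
    have hnN : n = (N : Int) := by omega
    rw [alt_fold_cast M hM1 K]
    simp only [decide_eq_true_eq]
    obtain ⟨hdvd, hfac⟩ := gfold_factorization hM1 K
    set r := gfold M K with hrdef
    have hrpos : 1 ≤ r := gfold_pos hM1 K
    have hfne : N.factorial ≠ 0 := Nat.factorial_ne_zero N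
    have hKfne : K.factorial ≠ 0 := Nat.factorial_ne_zero K
    have habs : ∀ p : ℕ, p.Prime → p ≤ K → M.factorization p ≤ (K.factorial).factorization p := by
      intro p hp hpK
      exact absorbed hM1 hMle hp (by omega)
    have hKNfac : ∀ p : ℕ, (K.factorial).factorization p ≤ (N.factorial).factorization p := by
      intro p
      have := (Nat.factorization_le_iff_dvd hKfne hfne).mpr
        (Nat.factorial_dvd_factorial (by omega))
      rw [Finsupp.le_def] at this
      exact this p
    have hrK : ∀ p : ℕ, p.Prime → p ≤ K → r.factorization p = 0 := by
      intro p hp hpK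
      have := hfac p
      have := habs p hp hpK
      omega
    have hrbig : ∀ p : ℕ, p.Prime → K < p → r.factorization p = M.factorization p := by
      intro p hp hpK
      have := hfac p
      rw [Nat.factorization_factorial_eq_zero_of_lt hpK] at this
      omega
    by_cases hr1 : r = 1
    · -- everything absorbed: M ∣ N! and the test passes
      have hMdvd : M ∣ N.factorial := by
        apply (Nat.factorization_le_iff_dvd (by omega) hfne).mp
        rw [Finsupp.le_def]
        intro q
        by_cases hq : q.Prime
        · by_cases hqK : q ≤ K
          · exact le_trans (habs q hq hqK) (hKNfac q)
          · have := hrbig q hq (by omega)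
            rw [hr1] at this
            simp [Nat.factorization_one] at this
            omega
        · rw [(Nat.factorization_eq_zero_iff M q).mpr (Or.inl hq)]
          omega
      rw [hr1]
      constructor
      · intro _; exact hMdvd
      · intro _; omega
    · -- the residue is a single prime > K
      obtain ⟨q, hq, hqd⟩ := Nat.exists_prime_and_dvd hr1
      have hrne : r ≠ 0 := by omega
      have hqK : K < q := by
        by_contra hc
        have := hrK q hq (by omega)
        have := Nat.Prime.factorization_pos_of_dvd hq hrne hqd
        omega
      have hqM : q ∣ M := dvd_trans hqd hdvd
      have hsqlt : M.sqrt < q := by omega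
      have hMfq1 : M.factorization q = 1 := by
        have hpos : 0 < M.factorization q := Nat.Prime.factorization_pos_of_dvd hq (by omega) hqM
        by_contra hne1
        have h2 : q ^ 2 ∣ M := (Nat.Prime.pow_dvd_iff_le_factorization hq (by omega)).mpr (by omega)
        have hle2 : q ^ 2 ≤ M := Nat.le_of_dvd (by omega) h2
        have : q ≤ M.sqrt := Nat.le_sqrt.mpr (by nlinarith)
        omega
      have hrq : r = q := by
        by_contra hne
        obtain ⟨s, hs⟩ := hqd
        have hs1 : s ≠ 1 := by intro h; rw [h, mul_one] at hs; exact hne hs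
        obtain ⟨q', hq', hq'd⟩ := Nat.exists_prime_and_dvd hs1
        have hq'r : q' ∣ r := hs ▸ (hq'd.mul_left q)
        by_cases heq : q' = q
        · subst heq
          have hqq : q' * q' ∣ r := hs ▸ mul_dvd_mul_left q' hq'd
          have h2 : q' ^ 2 ∣ M := by
            rw [pow_two]; exact dvd_trans hqq hdvd
          have hle2 : q' ^ 2 ≤ M := Nat.le_of_dvd (by omega) h2
          have : q' ≤ M.sqrt := Nat.le_sqrt.mpr (by nlinarith)
          omega
        · have hq'K : K < q' := by
            by_contra hc
            have := hrK q' hq' (by omega)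
            have := Nat.Prime.factorization_pos_of_dvd hq' hrne hq'r
            omega
          have hqq' : q * q' ∣ M :=
            Nat.Coprime.mul_dvd_of_dvd_of_dvd
              ((Nat.coprime_primes hq hq').mpr (Ne.symm heq)) hqM (dvd_trans hq'r hdvd)
          have hleM : q * q' ≤ M := Nat.le_of_dvd (by omega) hqq'
          have hsq := Nat.lt_succ_sqrt M
          nlinarith
      rw [hnN, hrq]
      have hfq : ∀ p : ℕ, p ≠ q → (q : ℕ).factorization p = 0 := by
        intro p hpq
        rw [Nat.Prime.factorization hq, Finsupp.single_apply, if_neg (by omega : ¬ q = p)]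
      constructor
      · intro hqN
        have hqN' : q ≤ N := by exact_mod_cast hqN
        have hqNfac : q ∣ N.factorial := (Nat.Prime.dvd_factorial hq).mpr hqN'
        have hqpos : 0 < (N.factorial).factorization q :=
          Nat.Prime.factorization_pos_of_dvd hq hfne hqNfac
        apply (Nat.factorization_le_iff_dvd (by omega) hfne).mp
        rw [Finsupp.le_def]
        intro p
        by_cases hp : p.Prime
        · by_cases hpK : p ≤ K
          · exact le_trans (habs p hp hpK) (hKNfac p)
          · have hMr : M.factorization p = r.factorization p := (hrbig p hp (by omega)).symm
            by_cases hpq : p = q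
            · subst hpq
              rw [hMfq1]
              omega
            · rw [hMr, hrq, hfq p hpq]
              omega
        · rw [(Nat.factorization_eq_zero_iff M p).mpr (Or.inl hp)]
          omega
      · intro hMdvd
        have hle' := (Nat.factorization_le_iff_dvd (by omega) hfne).mpr hMdvd
        rw [Finsupp.le_def] at hle'
        have := hle' q
        rw [hMfq1] at this
        have hqNfac : q ∣ N.factorial := by
          rw [Nat.Prime.dvd_iff_one_le_factorization hq hfne]
          omega
        have : q ≤ N := (Nat.Prime.dvd_factorial hq).mp hqNfac
        exact_mod_cast this

-- ===== VERDICT (by name: the statement is the Claim_ definition above) =====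
theorem divides_factorial_spec : Claim_equal_divides_factorial := by
  intro n m hDom hPre
  unfold Spec_divides_factorial
  by_cases hm : m = 0
  · simp [divides_factorial, divides_factorial_alt, hm]
  · have h1 : 1 ≤ m := by
      have : (0 : Int) ≤ m := hPre
      omega
    have ha := A_iff n m hDom h1
    have hb := B_iff n m hDom h1
    cases hA : divides_factorial n m <;> cases hB : divides_factorial_alt n m <;>
      simp_all
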